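-- pv_equiv track=rewrite | github.com/StarSein/BaekJoon | 백준/Gold/12892. 생일 선물/생일 선물.py | solution
-- ===== SOURCE A (Python) =====
-- from typing import List, Tuple
--
-- def solution(N: int, D: int, gifts: List[Tuple[int, int]]) -> int:
--     gifts.sort(key=lambda x: x[0])
--
--     li = 0
--     lp, lv = gifts[li]
--     max_v = cur_v = lv
--
--     for ri in range(1, N):
--         rp, rv = gifts[ri]
--
--         while li < ri and lp + D <= rp:
--             cur_v -= lv
--             li += 1
--             lp, lv = gifts[li]
--
--         cur_v += rv
--         max_v = max(max_v, cur_v)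
--
--     return max_v
-- ===== SOURCE B (Python) =====
-- from typing import List, Tuple
--
-- def _bisect_right(a, x):
--     lo, hi = 0, len(a)
--     while lo < hi:
--         mid = (lo + hi) // 2
--         if x < a[mid]:
--             hi = mid
--         else:
--             lo = mid + 1
--     return lo
--
-- def solution(N: int, D: int, gifts: List[Tuple[int, int]]) -> int:
--     gifts.sort(key=lambda x: x[0])
--
--     positions = [p for p, _ in gifts[:N]]
--     prefix = [0]
--     for _, v in gifts[:N]:
--         prefix.append(prefix[-1] + v)
--
--     best = gifts[0][1]
--     for ri in range(1, N):
--         left = min(_bisect_right(positions, positions[ri] - D), ri)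
--         best = max(best, prefix[ri + 1] - prefix[left])
--     return best
-- ===== Notes on version B (the rewrite author's own statement) =====
-- stated objective: alternative
-- what changed: Replaces the stateful two-pointer sweep (sliding left index with carried position/value/window-sum state) by an independent per-index computation: a prefix-sum array over the first N values plus a binary search (bisect_right) on the sorted positions gives each window sum directly as prefix[ri+1]-prefix[min(bisect,ri)].
import Mathlib
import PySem

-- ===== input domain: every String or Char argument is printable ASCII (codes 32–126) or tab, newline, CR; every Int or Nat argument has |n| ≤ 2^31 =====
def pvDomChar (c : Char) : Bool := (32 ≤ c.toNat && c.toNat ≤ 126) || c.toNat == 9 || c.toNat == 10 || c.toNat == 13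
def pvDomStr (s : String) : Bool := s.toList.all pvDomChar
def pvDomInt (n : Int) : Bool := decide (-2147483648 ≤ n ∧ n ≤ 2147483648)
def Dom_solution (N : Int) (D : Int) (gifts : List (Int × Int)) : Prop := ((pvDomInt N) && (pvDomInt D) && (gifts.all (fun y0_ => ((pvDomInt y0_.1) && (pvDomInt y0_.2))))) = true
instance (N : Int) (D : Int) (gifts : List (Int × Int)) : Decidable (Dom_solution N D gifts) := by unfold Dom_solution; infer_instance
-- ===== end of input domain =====

-- B replaces A's stateful two-pointer sweep by prefix sums + a binary search per index (alternative algorithm, same cost class).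
-- Both A and B sort the argument list in place in Python; the equivalence proved here is about the return value.

-- ===== PORT A =====
-- the inner 'while li < ri and lp + D <= rp' loop; the fuel only makes the recursion total
def pvAwhile (g : List (Int × Int)) (D rp ri : Int) : Nat → Int × Int × Int × Int → Int × Int × Int × Int
  | 0, s => s
  | fuel + 1, (li, lp, lv, cur) =>
    if li < ri ∧ lp + D ≤ rp then
      let nxt := PySem.List.pyGetD g (li + 1) (0, 0)
      pvAwhile g D rp ri fuel (li + 1, nxt.1, nxt.2, cur - lv)
    else (li, lp, lv, cur)

def solution (N : Int) (D : Int) (gifts : List (Int × Int)) : Int :=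
  let g := PySem.List.sorted gifts (fun x => x.1)
  let g0 := PySem.List.pyGetD g 0 (0, 0)
  let final := (PySem.List.pyRange 1 N 1).foldl
    (fun (s : Int × Int × Int × Int × Int) ri =>
      let r := PySem.List.pyGetD g ri (0, 0)
      let w := pvAwhile g D r.1 ri (ri - s.1).toNat (s.1, s.2.1, s.2.2.1, s.2.2.2.1)
      let cur2 := w.2.2.2 + r.2
      (w.1, w.2.1, w.2.2.1, cur2, max s.2.2.2.2 cur2))
    (0, g0.1, g0.2, g0.2, g0.2)
  final.2.2.2.2

-- ===== PORT B =====
-- Source B's hand-written _bisect_right is literally Python's bisect.bisect_right loop,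
-- which PySem.List.bisectRight models exactly (same lo/hi/mid recursion).
def solution_alt (N : Int) (D : Int) (gifts : List (Int × Int)) : Int :=
  let g := PySem.List.sorted gifts (fun x => x.1)
  let firstN := PySem.List.slice g none (some N)
  let positions := firstN.map (fun x => x.1)
  let pfx := firstN.foldl (fun acc x => acc ++ [PySem.List.pyGetD acc (-1) 0 + x.2]) [0]
  (PySem.List.pyRange 1 N 1).foldl
    (fun best ri =>
      let left := min ((PySem.List.bisectRight positions (PySem.List.pyGetD positions ri 0 - D) : Nat) : Int) ri
      max best (PySem.List.pyGetD pfx (ri + 1) 0 - PySem.List.pyGetD pfx left 0))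
    (PySem.List.pyGetD g 0 (0, 0)).2

-- ===== PRECONDITION & SPEC =====
-- A raises IndexError on the empty list (gifts[0]) and, when N > len(gifts), at gifts[ri]; Pre_ excludes exactly those.
def Pre_solution (N : Int) (D : Int) (gifts : List (Int × Int)) : Prop :=
  gifts ≠ [] ∧ N ≤ (gifts.length : Int)
instance (N : Int) (D : Int) (gifts : List (Int × Int)) : Decidable (Pre_solution N D gifts) := by
  unfold Pre_solution; infer_instance

def pvWitness_solution : Int × Int × (List (Int × Int)) := (2, 3, [(5, 1), (2, 4)])

def Spec_solution (N : Int) (D : Int) (gifts : List (Int × Int)) (out : Int) : Prop := out = solution_alt N D gifts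
instance (N : Int) (D : Int) (gifts : List (Int × Int)) (out : Int) : Decidable (Spec_solution N D gifts out) := by unfold Spec_solution; infer_instance

-- ===== CLAIM (what is proved, stated in full; the proofs are below) =====
def Claim_equal_solution : Prop := ∀ (N : Int) (D : Int) (gifts : List (Int × Int)), Dom_solution N D gifts → Pre_solution N D gifts → Spec_solution N D gifts (solution N D gifts)

-- ===== LEMMAS AND PROOFS =====

-- number of entries ≤ t (on a ≤-sorted list: the index of the first entry > t)
def pvCnt (P : List Int) (t : Int) : Nat := P.countP (fun p => decide (p ≤ t))

-- the left end of the window ending at index r of the sorted list g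
def pvW (g : List (Int × Int)) (D : Int) (r : Nat) : Nat :=
  min (pvCnt (g.map (·.1)) ((g.getD r (0, 0)).1 - D)) r

-- sum of the values at indices a..b-1
def pvSum (V : List Int) (a b : Nat) : Int := ((V.drop a).take (b - a)).sum

-- the list of partial sums that B's prefix loop builds
def pvPartial (V : List Int) : List Int := (List.range (V.length + 1)).map (fun i => (V.take i).sum)

-- A's per-iteration step (definitionally the fold body of `solution`)
def pvAstep (g : List (Int × Int)) (D : Int) : Int × Int × Int × Int × Int → Int → Int × Int × Int × Int × Int :=
  fun s ri =>
    let r := PySem.List.pyGetD g ri (0, 0)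
    let w := pvAwhile g D r.1 ri (ri - s.1).toNat (s.1, s.2.1, s.2.2.1, s.2.2.2.1)
    let cur2 := w.2.2.2 + r.2
    (w.1, w.2.1, w.2.2.1, cur2, max s.2.2.2.2 cur2)

-- B's per-iteration step (definitionally the fold body of `solution_alt`)
def pvBstep (positions pfx : List Int) (D : Int) : Int → Int → Int :=
  fun best ri =>
    let left := min ((PySem.List.bisectRight positions (PySem.List.pyGetD positions ri 0 - D) : Nat) : Int) ri
    max best (PySem.List.pyGetD pfx (ri + 1) 0 - PySem.List.pyGetD pfx left 0)

theorem pvCnt_mono (P : List Int) {t t' : Int} (h : t ≤ t') : pvCnt P t ≤ pvCnt P t' := by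
  apply List.countP_mono_left
  intro a _ ha
  simp_all; omega

theorem pvCnt_boundary {P : List Int} (hs : P.Pairwise (· ≤ ·)) (t : Int) :
    pvCnt P t ≤ P.length ∧ ∀ j (hj : j < P.length), (P[j] ≤ t ↔ j < pvCnt P t) := by
  induction P with
  | nil => simp [pvCnt]
  | cons a P ih =>
    rcases List.pairwise_cons.mp hs with ⟨ha, hs'⟩
    rcases ih hs' with ⟨h1, h2⟩
    by_cases hat : a ≤ t
    · refine ⟨?_, ?_⟩
      · simp [pvCnt, hat] at *; omega
      · intro j hj
        match j with
        | 0 => simp [pvCnt, List.countP_cons, hat]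
        | j+1 =>
          simp only [List.getElem_cons_succ]
          rw [h2 j (by simpa using hj)]
          simp [pvCnt, List.countP_cons, hat]
    · have hcnt : pvCnt (a :: P) t = 0 := by
        have : List.countP (fun p => decide (p ≤ t)) P = 0 := by
          apply List.countP_eq_zero.mpr
          intro b hb
          have := ha b hb
          simp; omega
        simp [pvCnt, List.countP_cons, hat, this]
      refine ⟨by omega, ?_⟩
      intro j hj
      rw [hcnt]
      simp only [Nat.not_lt_zero, iff_false]
      match j with
      | 0 => simpa using hat
      | j+1 =>
        simp only [List.getElem_cons_succ]
        have := ha (P[j]'(by simpa using hj)) (by simp)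
        omega

theorem pvBisect_eq_cnt {P : List Int} (hs : P.Pairwise (· ≤ ·)) (t : Int) :
    PySem.List.bisectRight P t = pvCnt P t := by
  obtain ⟨hb1, hb2, hb3⟩ := PySem.List.bisectRight_spec P t hs
  obtain ⟨hc1, hc2⟩ := pvCnt_boundary hs t
  set b := PySem.List.bisectRight P t with hb
  set c := pvCnt P t with hc
  rcases Nat.lt_trichotomy b c with h | h | h
  · have hblen : b < P.length := lt_of_lt_of_le h hc1
    have := hb3 b hblen le_rfl
    have := (hc2 b hblen).mpr h
    omega
  · exact h
  · have hclen : c < P.length := lt_of_lt_of_le h hb1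
    have := hb2 c hclen h
    have := (hc2 c hclen).mp this
    omega

theorem pvCnt_take {P : List Int} (hs : P.Pairwise (· ≤ ·)) (t : Int) (m : Nat) :
    pvCnt (P.take m) t = min (pvCnt P t) m := by
  obtain ⟨hc1, hc2⟩ := pvCnt_boundary hs t
  obtain ⟨hd1, hd2⟩ := pvCnt_boundary (hs.sublist (List.take_sublist m P)) t
  set c := pvCnt P t
  set d := pvCnt (P.take m) t
  have hlen : (P.take m).length = min m P.length := by simp
  rcases Nat.lt_trichotomy d (min c m) with h | h | h
  · have hdP : d < P.length := by omega
    have h1 := (hc2 d hdP).mpr (by omega)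
    have heq : (P.take m)[d]'(by omega) = P[d] := by simp
    have h2 : (P.take m)[d]'(by omega) ≤ t := by rw [heq]; exact h1
    have := (hd2 d (by omega)).mp h2
    omega
  · exact h
  · have hd : d ≤ min m P.length := by omega
    have hcm : c < d := by omega
    have hcP : c < P.length := by omega
    have h1 := (hd2 c (by omega)).mpr (by omega)
    have : (P.take m)[c]'(by omega) = P[c] := by simp
    rw [this] at h1
    have := (hc2 c hcP).mp h1
    omega

theorem pvSum_split (V : List Int) {a b c : Nat} (hab : a ≤ b) (hbc : b ≤ c) :
    pvSum V a c = pvSum V a b + pvSum V b c := by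
  unfold pvSum
  have h1 : c - a = (b - a) + (c - b) := by omega
  rw [h1, List.take_add, List.sum_append]
  congr 2
  rw [List.drop_drop, show a + (b - a) = b by omega]

theorem pvSum_succ (V : List Int) {a b : Nat} (hab : a ≤ b) (hb : b < V.length) :
    pvSum V a (b + 1) = pvSum V a b + V[b] := by
  rw [pvSum_split V hab (by omega : b ≤ b + 1)]
  unfold pvSum
  congr 1
  have h1 : b + 1 - b = 1 := by omega
  rw [h1, List.take_one]
  have : (V.drop b).head? = some V[b] := by
    rw [List.head?_drop]
    simp [hb]
  simp [this]

theorem pvSum_refl (V : List Int) (a : Nat) : pvSum V a a = 0 := by simp [pvSum]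

theorem pvSum_zero (V : List Int) (b : Nat) : pvSum V 0 b = (V.take b).sum := by simp [pvSum]

theorem pvSum_take (V : List Int) {a b m : Nat} (hb : b ≤ m) :
    pvSum (V.take m) a b = pvSum V a b := by
  unfold pvSum
  rw [List.drop_take, List.take_take, show min (b - a) (m - a) = b - a by omega]

theorem pvPartial_getD (V : List Int) (i : Nat) (hi : i ≤ V.length) :
    (pvPartial V).getD i 0 = (V.take i).sum := by
  unfold pvPartial
  rw [List.getD_eq_getElem?_getD, List.getElem?_map]
  simp [List.getElem?_range (by omega : i < V.length + 1)]

theorem pvPartial_append (U : List Int) (v : Int) :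
    pvPartial (U ++ [v]) = pvPartial U ++ [U.sum + v] := by
  unfold pvPartial
  simp only [List.length_append, List.length_cons, List.length_nil]
  rw [show U.length + 1 + 1 = (U.length + 1) + 1 from rfl, List.range_succ, List.map_append]
  congr 1
  · apply List.map_congr_left
    intro i hi
    simp at hi
    rw [List.take_append_of_le_length (by omega)]
  · simp

theorem pvPartial_last (U : List Int) :
    PySem.List.pyGetD (pvPartial U) (-1) 0 = U.sum := by
  have h1 : pvPartial U = (List.range U.length).map (fun i => (U.take i).sum) ++ [(U.take U.length).sum] := by
    unfold pvPartial
    rw [List.range_succ, List.map_append]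
    rfl
  rw [h1, PySem.List.pyGetD_neg_one_append_singleton]
  simp

theorem pvPrefix_fold (L : List (Int × Int)) :
    L.foldl (fun acc x => acc ++ [PySem.List.pyGetD acc (-1) 0 + x.2]) [0]
      = pvPartial (L.map (·.2)) := by
  suffices h : ∀ (U : List Int), L.foldl (fun acc x => acc ++ [PySem.List.pyGetD acc (-1) 0 + x.2]) (pvPartial U)
      = pvPartial (U ++ L.map (·.2)) by
    have := h []
    simpa [pvPartial] using this
  induction L with
  | nil => simp
  | cons x L ih =>
    intro U
    simp only [List.foldl_cons, List.map_cons]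
    rw [pvPartial_last, ← pvPartial_append, ih]
    simp

theorem pvAwhile_spec (g : List (Int × Int)) (hs : g.Pairwise (fun a b => a.1 ≤ b.1))
    (D : Int) (r : Nat) (hr : r < g.length) (li : Nat)
    (hli : li ≤ min (pvCnt (g.map (·.1)) ((g.getD r (0, 0)).1 - D)) r) (cur : Int) (fuel : Nat)
    (hfuel : r - li ≤ fuel) :
    pvAwhile g D (g.getD r (0, 0)).1 (r : Int) fuel
        ((li : Int), (g.getD li (0, 0)).1, (g.getD li (0, 0)).2, cur)
      = ((pvW g D r : Int), (g.getD (pvW g D r) (0, 0)).1, (g.getD (pvW g D r) (0, 0)).2,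
         cur - pvSum (g.map (·.2)) li (pvW g D r)) := by
  have hq : (g.map (·.1)).Pairwise (· ≤ ·) := by
    rw [List.pairwise_map]; exact hs
  set t := (g.getD r (0, 0)).1 - D with ht
  obtain ⟨hc1, hc2⟩ := pvCnt_boundary hq t
  set c := pvCnt (g.map (·.1)) t with hcdef
  have hqlen : (g.map (·.1)).length = g.length := by simp
  have hWdef : pvW g D r = min c r := rfl
  induction fuel generalizing li cur with
  | zero =>
    have hlir : li = r := by omega
    have hW : pvW g D r = li := by rw [hWdef]; omega
    simp [pvAwhile, hW, pvSum_refl]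
  | succ fuel ih =>
    by_cases hcond : li < r ∧ li < c
    · have hli1 : li < g.length := by omega
      have hcmp : (g.getD li (0, 0)).1 ≤ t := by
        have := (hc2 li (by omega)).mpr hcond.2
        rwa [List.getElem_map, ← List.getD_eq_getElem g (0,0) hli1] at this
      have hstep : pvAwhile g D (g.getD r (0, 0)).1 (r : Int) (fuel + 1)
            ((li : Int), (g.getD li (0, 0)).1, (g.getD li (0, 0)).2, cur)
          = pvAwhile g D (g.getD r (0, 0)).1 (r : Int) fuel
            ((li + 1 : Nat), (g.getD (li+1) (0, 0)).1, (g.getD (li+1) (0, 0)).2,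
             cur - (g.getD li (0, 0)).2) := by
        show (if _ then _ else _) = _
        rw [if_pos ⟨by exact_mod_cast hcond.1, by omega⟩]
        have h1 : ((li : Int) + 1) = ((li + 1 : Nat) : Int) := by push_cast; ring
        rw [h1, PySem.List.pyGetD_natCast]
      rw [hstep, ih (li + 1) (cur - (g.getD li (0, 0)).2) (by omega) (by omega)]
      have hWr : li < pvW g D r := by rw [hWdef]; omega
      have hsum : pvSum (g.map (·.2)) li (pvW g D r)
          = (g.getD li (0, 0)).2 + pvSum (g.map (·.2)) (li + 1) (pvW g D r) := by
        rw [pvSum_split (g.map (·.2)) (show li ≤ li + 1 by omega) (by omega)]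
        have h1 : pvSum (g.map (·.2)) li (li + 1) = (g.map (·.2))[li]'(by simp; omega) := by
          have := pvSum_succ (g.map (·.2)) (le_refl li) (by simp; omega)
          rwa [pvSum_refl, zero_add] at this
        rw [h1, List.getElem_map, ← List.getD_eq_getElem g (0,0) (by omega)]
      rw [hsum]; ring_nf
    · have hW : pvW g D r = li := by
        rw [hWdef]
        rcases Nat.lt_or_ge li r with h | h
        · have : ¬ li < c := fun hlc => hcond ⟨h, hlc⟩
          omega
        · omega
      have hexit : ¬ ((li : Int) < (r : Int) ∧ (g.getD li (0, 0)).1 + D ≤ (g.getD r (0, 0)).1) := by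
        intro ⟨h1, h2⟩
        have hlir : li < r := by exact_mod_cast h1
        have hli1 : li < g.length := by omega
        have hle : (g.map (·.1))[li]'(by omega) ≤ t := by
          rw [List.getElem_map, ← List.getD_eq_getElem g (0,0) hli1]; omega
        have := (hc2 li (by omega)).mp hle
        exact hcond ⟨hlir, this⟩
      show (if _ then _ else _) = _
      rw [if_neg hexit, hW]
      simp [pvSum_refl]

theorem pvW_mono (g : List (Int × Int)) (hs : g.Pairwise (fun a b => a.1 ≤ b.1)) (D : Int)
    {r : Nat} (hr : r + 1 < g.length) : pvW g D r ≤ pvW g D (r + 1) := by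
  have hle : (g.getD r (0,0)).1 ≤ (g.getD (r+1) (0,0)).1 := by
    rw [List.getD_eq_getElem g (0,0) (by omega), List.getD_eq_getElem g (0,0) hr]
    exact List.pairwise_iff_getElem.mp hs r (r+1) (by omega) hr (by omega)
  have := pvCnt_mono (g.map (·.1)) (by omega : (g.getD r (0,0)).1 - D ≤ (g.getD (r+1) (0,0)).1 - D)
  unfold pvW
  omega

theorem pvMain (g : List (Int × Int)) (hs : g.Pairwise (fun a b => a.1 ≤ b.1))
    (hg : 0 < g.length) (D N : Int) (hN : N ≤ (g.length : Int)) (n : Nat) (hn : n = N.toNat)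
    (m : Nat) (hm : 1 + (m : Int) ≤ N) :
    (PySem.List.pyRange 1 (1 + (m : Int)) 1).foldl (pvAstep g D)
        (0, (PySem.List.pyGetD g 0 (0,0)).1, (PySem.List.pyGetD g 0 (0,0)).2,
            (PySem.List.pyGetD g 0 (0,0)).2, (PySem.List.pyGetD g 0 (0,0)).2)
      = ((pvW g D m : Int), (g.getD (pvW g D m) (0,0)).1, (g.getD (pvW g D m) (0,0)).2,
         pvSum (g.map (·.2)) (pvW g D m) (m + 1),
         (PySem.List.pyRange 1 (1 + (m : Int)) 1).foldl
           (pvBstep ((g.map (·.1)).take n) (pvPartial ((g.map (·.2)).take n)) D)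
           (PySem.List.pyGetD g 0 (0,0)).2) := by
  have hq : (g.map (·.1)).Pairwise (· ≤ ·) := by rw [List.pairwise_map]; exact hs
  induction m with
  | zero =>
    rw [show (1 + ((0:Nat) : Int)) = 1 by norm_num, PySem.List.pyRange_one_eq_nil le_rfl]
    simp only [List.foldl_nil]
    have hW0 : pvW g D 0 = 0 := by simp [pvW]
    rw [hW0]
    have h0 : 0 < (g.map (·.2)).length := by simpa using hg
    have hsum : pvSum (g.map (·.2)) 0 (0 + 1) = (PySem.List.pyGetD g 0 (0,0)).2 := by
      have h1 := pvSum_succ (g.map (·.2)) (le_refl 0) h0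
      rw [pvSum_refl, zero_add] at h1
      rw [h1, List.getElem_map, ← List.getD_eq_getElem g (0,0) hg, PySem.List.pyGetD_zero]
      omega
    rw [hsum, PySem.List.pyGetD_zero]
    norm_num
  | succ m ih =>
    have hmN : (1 : Int) + (m : Int) ≤ N := by push_cast at hm ⊢; omega
    have hr1 : m + 1 < g.length := by push_cast at hm hN; omega
    have hr1n : m + 1 < n := by push_cast at hm; omega
    rw [show (1 + ((m+1 : Nat) : Int)) = (1 + (m:Int)) + 1 by push_cast; ring]
    rw [PySem.List.pyRange_one_succ_right (by omega)]
    rw [List.foldl_append, List.foldl_append]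
    rw [ih hmN]
    simp only [List.foldl_cons, List.foldl_nil]
    set Wm := pvW g D m with hWm
    set W' := pvW g D (m+1) with hW'
    have hWm_le : Wm ≤ m := by rw [hWm]; unfold pvW; omega
    have hW'_le : W' ≤ m + 1 := by rw [hW']; unfold pvW; omega
    have hWmW' : Wm ≤ W' := pvW_mono g hs D hr1
    have hcW' : W' = min (pvCnt (g.map (·.1)) ((g.getD (m+1) (0,0)).1 - D)) (m+1) := rfl
    have hAstep : pvAstep g D
        ((Wm : Int), (g.getD Wm (0,0)).1, (g.getD Wm (0,0)).2,
          pvSum (g.map (·.2)) Wm (m + 1),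
          (PySem.List.pyRange 1 (1 + (m : Int)) 1).foldl
            (pvBstep ((g.map (·.1)).take n) (pvPartial ((g.map (·.2)).take n)) D)
            (PySem.List.pyGetD g 0 (0,0)).2) (1 + (m:Int))
      = ((W' : Int), (g.getD W' (0,0)).1, (g.getD W' (0,0)).2,
          pvSum (g.map (·.2)) W' (m + 2),
          max ((PySem.List.pyRange 1 (1 + (m : Int)) 1).foldl
            (pvBstep ((g.map (·.1)).take n) (pvPartial ((g.map (·.2)).take n)) D)
            (PySem.List.pyGetD g 0 (0,0)).2) (pvSum (g.map (·.2)) W' (m + 2))) := by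
      unfold pvAstep
      simp only []
      have hcast : (1 + (m:Int)) = ((m+1 : Nat) : Int) := by push_cast; ring
      rw [hcast, PySem.List.pyGetD_natCast]
      have hfuel : (((m+1 : Nat) : Int) - ((Wm : Nat) : Int)).toNat = (m+1) - Wm := by omega
      rw [hfuel]
      have hli : Wm ≤ min (pvCnt (g.map (·.1)) ((g.getD (m+1) (0,0)).1 - D)) (m+1) := by omega
      rw [pvAwhile_spec g hs D (m+1) hr1 Wm hli (pvSum (g.map (·.2)) Wm (m + 1)) ((m+1) - Wm) (by omega)]
      rw [← hW']
      have hcur : pvSum (g.map (·.2)) Wm (m + 1) - pvSum (g.map (·.2)) Wm W'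
            + (g.getD (m+1) (0,0)).2 = pvSum (g.map (·.2)) W' (m + 2) := by
        have hsplit := pvSum_split (g.map (·.2)) hWmW' hW'_le
        have hsucc := pvSum_succ (g.map (·.2)) hW'_le (by simpa using hr1)
        rw [List.getElem_map, ← List.getD_eq_getElem g (0,0) hr1] at hsucc
        have h2 : m + 1 + 1 = m + 2 := rfl
        rw [h2] at hsucc
        omega
      rw [hcur]
    have hBstep : ∀ best : Int, pvBstep ((g.map (·.1)).take n) (pvPartial ((g.map (·.2)).take n)) D best (1 + (m:Int))
        = max best (pvSum (g.map (·.2)) W' (m + 2)) := by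
      intro best
      unfold pvBstep
      simp only []
      have hcast : (1 + (m:Int)) = ((m+1 : Nat) : Int) := by push_cast; ring
      have hPlen : ((g.map (·.1)).take n).length = n := by
        simp; push_cast at hN; omega
      have hVlen : ((g.map (·.2)).take n).length = n := by
        simp; push_cast at hN; omega
      have hpos : PySem.List.pyGetD ((g.map (·.1)).take n) ((m+1 : Nat) : Int) 0
          = (g.getD (m+1) (0,0)).1 := by
        rw [PySem.List.pyGetD_natCast, List.getD_eq_getElem _ 0 (by omega), List.getElem_take,
            List.getElem_map, ← List.getD_eq_getElem g (0,0) hr1]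
      have hbis : PySem.List.bisectRight ((g.map (·.1)).take n) ((g.getD (m+1) (0,0)).1 - D)
          = min (pvCnt (g.map (·.1)) ((g.getD (m+1) (0,0)).1 - D)) n := by
        rw [pvBisect_eq_cnt (hq.sublist (List.take_sublist n _)) _, pvCnt_take hq]
      have hleft : min ((PySem.List.bisectRight ((g.map (·.1)).take n) (PySem.List.pyGetD ((g.map (·.1)).take n) (1 + (m:Int)) 0 - D) : Nat) : Int) (1 + (m:Int))
          = ((W' : Nat) : Int) := by
        rw [hcast, hpos, hbis, hcW']
        push_cast
        omega
      rw [hleft]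
      have hup : PySem.List.pyGetD (pvPartial ((g.map (·.2)).take n)) ((1 + (m:Int)) + 1) 0
          = (((g.map (·.2)).take n).take (m+2)).sum := by
        rw [show (1 + (m:Int)) + 1 = ((m+2 : Nat) : Int) by push_cast; ring]
        rw [PySem.List.pyGetD_natCast, pvPartial_getD _ _ (by omega)]
      have hlo : PySem.List.pyGetD (pvPartial ((g.map (·.2)).take n)) ((W' : Nat) : Int) 0
          = (((g.map (·.2)).take n).take W').sum := by
        rw [PySem.List.pyGetD_natCast, pvPartial_getD _ _ (by omega)]
      rw [hup, hlo]
      have hdiff : (((g.map (·.2)).take n).take (m+2)).sum - (((g.map (·.2)).take n).take W').sum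
          = pvSum (g.map (·.2)) W' (m + 2) := by
        rw [← pvSum_zero, ← pvSum_zero,
            pvSum_split ((g.map (·.2)).take n) (Nat.zero_le W') (by omega : W' ≤ m + 2),
            pvSum_take (V := g.map (·.2)) (by omega : m + 2 ≤ n)]
        ring
      rw [hdiff]
    rw [hAstep, hBstep]

-- ===== VERDICT (by name: the statement is the Claim_ definition above) =====
theorem solution_spec : Claim_equal_solution := by
  intro N D gifts _ hpre
  obtain ⟨hne, hlenN⟩ := hpre
  unfold Spec_solution
  have hglen : (PySem.List.sorted gifts (fun x => x.1)).length = gifts.length :=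
    PySem.List.length_sorted gifts (fun x => x.1) false
  set g := PySem.List.sorted gifts (fun x => x.1) with hgdef
  have hg : 0 < g.length := by rw [hglen]; exact List.length_pos_of_ne_nil hne
  have hs : g.Pairwise (fun a b => a.1 ≤ b.1) := PySem.List.sorted_pairwise gifts (fun x => x.1)
  have hN : N ≤ (g.length : Int) := by rw [hglen]; exact hlenN
  show ((PySem.List.pyRange 1 N 1).foldl (pvAstep g D)
      (0, (PySem.List.pyGetD g 0 (0,0)).1, (PySem.List.pyGetD g 0 (0,0)).2,
          (PySem.List.pyGetD g 0 (0,0)).2, (PySem.List.pyGetD g 0 (0,0)).2)).2.2.2.2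
    = (PySem.List.pyRange 1 N 1).foldl
        (pvBstep ((PySem.List.slice g none (some N)).map (fun x => x.1))
          ((PySem.List.slice g none (some N)).foldl
            (fun acc x => acc ++ [PySem.List.pyGetD acc (-1) 0 + x.2]) [0]) D)
        (PySem.List.pyGetD g 0 (0,0)).2
  rcases (by omega : N ≤ 1 ∨ 1 < N) with hN1 | hN1
  · rw [PySem.List.pyRange_one_eq_nil hN1]
    rfl
  · have hslice : PySem.List.slice g none (some N) = g.take N.toNat :=
      PySem.List.slice_to g (by omega)
    have hpos : (PySem.List.slice g none (some N)).map (fun x => x.1) = (g.map (·.1)).take N.toNat := by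
      rw [hslice, List.map_take]
    have hpfx : (PySem.List.slice g none (some N)).foldl
          (fun acc x => acc ++ [PySem.List.pyGetD acc (-1) 0 + x.2]) [0]
        = pvPartial ((g.map (·.2)).take N.toNat) := by
      rw [hslice, pvPrefix_fold, List.map_take]
    rw [hpos, hpfx]
    obtain ⟨m, hm⟩ : ∃ m : Nat, (1 + (m : Int)) = N := ⟨(N - 1).toNat, by omega⟩
    have hmain := pvMain g hs hg D N hN N.toNat rfl m (by omega)
    rw [hm] at hmain
    rw [hmain]
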